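-- pv_equiv track=rewrite | github.com/Parkbyounghyo/nori-ai-java | nori-server/app/service/file_chunker.py | _fallback_chunk
-- ===== SOURCE A (Python) =====
-- def _fallback_chunk(lines: list, max_chars: int) -> str:
--     """청킹 실패 시 앞뒤 균등 분배"""
--     half = max_chars // 2
--     head_lines = []
--     head_total = 0
--     for i, line in enumerate(lines):
--         cost = len(line) + 7
--         if head_total + cost > half:
--             break
--         head_lines.append(f"{i+1:4d}| {line}")
--         head_total += cost
--
--     tail_lines = []
--     tail_total = 0
--     for i in range(len(lines) - 1, -1, -1):
--         cost = len(lines[i]) + 7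
--         if tail_total + cost > half:
--             break
--         tail_lines.insert(0, f"{i+1:4d}| {lines[i]}")
--         tail_total += cost
--
--     head_end = len(head_lines)
--     tail_start = len(lines) - len(tail_lines) + 1
--     skipped = tail_start - head_end - 1
--
--     result = '\n'.join(head_lines)
--     if skipped > 0:
--         result += f"\n    | // ... (Line {head_end+1}~{tail_start-1}, {skipped}줄 생략)\n"
--         result += '\n'.join(tail_lines)
--
--     return result
-- ===== SOURCE B (Python) =====
-- def _fallback_chunk(lines: list, max_chars: int) -> str:
--     """Prefix/suffix cumulative sums + counting + slicing instead of break loops and insert(0)."""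
--     half = max_chars // 2
--     costs = [len(l) + 7 for l in lines]
--
--     prefix = []
--     t = 0
--     for c in costs:
--         t += c
--         prefix.append(t)
--     # costs are strictly positive, so the cumulative sums are increasing:
--     # the number of prefix sums <= half is exactly the greedy head count.
--     h = sum(1 for p in prefix if p <= half)
--
--     suffix = []
--     t = 0
--     for c in reversed(costs):
--         t += c
--         suffix.append(t)
--     tcount = sum(1 for p in suffix if p <= half)
--
--     n = len(lines)
--     head = [f"{i + 1:4d}| {l}" for i, l in enumerate(lines[:h])]
--     tail = [f"{i + 1:4d}| {l}" for i, l in enumerate(lines[n - tcount:], start=n - tcount)]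
--
--     head_end = h
--     tail_start = n - tcount + 1
--     skipped = tail_start - head_end - 1
--
--     result = '\n'.join(head)
--     if skipped > 0:
--         result += f"\n    | // ... (Line {head_end + 1}~{tail_start - 1}, {skipped}줄 생략)\n"
--         result += '\n'.join(tail)
--     return result
-- ===== Notes on version B (the rewrite author's own statement) =====
-- stated objective: alternative
-- what changed: Replaces A's two break loops (the backward tail loop growing its list with quadratic insert(0)) by cumulative per-line cost sums over the forward and reversed cost lists, counting how many cumulative sums fit within half the budget, and building the head/tail blocks by slicing and enumerating once.
import Mathlib
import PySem

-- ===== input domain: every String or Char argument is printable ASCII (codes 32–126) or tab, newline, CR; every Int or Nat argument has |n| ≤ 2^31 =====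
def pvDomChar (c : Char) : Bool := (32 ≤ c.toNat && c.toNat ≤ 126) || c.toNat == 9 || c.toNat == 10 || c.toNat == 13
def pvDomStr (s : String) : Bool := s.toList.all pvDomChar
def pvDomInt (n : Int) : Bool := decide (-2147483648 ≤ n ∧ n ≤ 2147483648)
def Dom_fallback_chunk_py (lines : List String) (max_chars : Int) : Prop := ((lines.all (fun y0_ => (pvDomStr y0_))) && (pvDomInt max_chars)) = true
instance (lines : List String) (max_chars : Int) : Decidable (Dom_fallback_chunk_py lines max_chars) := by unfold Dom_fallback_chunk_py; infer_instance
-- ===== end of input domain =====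

-- B replaces A's two break loops (the tail one quadratic via insert(0)) by cumulative cost
-- sums, counting how many sums fit in the half budget, and slicing; objective: alternative.

-- shared formatting helper for the f-string f"{i+1:4d}| {line}" used identically by both Pythons
def pvPad4 (n : Int) : String :=
  let cs := PySem.Int.toChars n
  String.ofList (List.replicate (4 - cs.length) ' ' ++ cs)

def pvFmt (i : Int) (l : String) : String := pvPad4 (i + 1) ++ "| " ++ l

def pvCost (l : String) : Int := PySem.Str.len l + 7

-- ===== PORT A =====
-- head loop: for i, line in enumerate(lines): break when head_total+cost > half
def pvHeadLoopA (half : Int) (ls : List String) (i tot : Int) : List String :=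
  match ls with
  | [] => []
  | l :: ls' =>
    if tot + pvCost l > half then []
    else pvFmt i l :: pvHeadLoopA half ls' (i + 1) (tot + pvCost l)

-- tail loop: for i in range(len(lines)-1, -1, -1): break when tail_total+cost > half;
-- lines[i] via pyGetD (every index produced by the range is in bounds, so the default is never used)
def pvTailLoopA (half : Int) (lines : List String) (rng : List Int) (acc : List String) (tot : Int) : List String :=
  match rng with
  | [] => acc
  | i :: rest =>
    let l := PySem.List.pyGetD lines i ""
    if tot + pvCost l > half then acc
    else pvTailLoopA half lines rest (pvFmt i l :: acc) (tot + pvCost l)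

def fallback_chunk_py (lines : List String) (max_chars : Int) : String :=
  let half := PySem.Int.floordiv max_chars 2
  let head_lines := pvHeadLoopA half lines 0 0
  let tail_lines := pvTailLoopA half lines (PySem.List.pyRange (PySem.List.len lines - 1) (-1) (-1)) [] 0
  let head_end : Int := head_lines.length
  let tail_start : Int := PySem.List.len lines - tail_lines.length + 1
  let skipped := tail_start - head_end - 1
  let result := PySem.Str.join "\n" head_lines
  if skipped > 0 then
    result ++ ("\n    | // ... (Line " ++ PySem.Int.toStr (head_end + 1) ++ "~" ++
      PySem.Int.toStr (tail_start - 1) ++ ", " ++ PySem.Int.toStr skipped ++ "줄 생략)\n") ++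
      PySem.Str.join "\n" tail_lines
  else result

-- ===== PORT B =====
-- running cumulative sums: the loop 't += c; prefix.append(t)'
def pvCumSum (cs : List Int) (t : Int) : List Int :=
  match cs with
  | [] => []
  | c :: cs' => (t + c) :: pvCumSum cs' (t + c)

def fallback_chunk_py_alt (lines : List String) (max_chars : Int) : String :=
  let half := PySem.Int.floordiv max_chars 2
  let costs := lines.map pvCost
  let pref := pvCumSum costs 0
  let h : Nat := pref.countP (fun p => decide (p ≤ half))     -- sum(1 for p in prefix if p <= half)
  let suffix := pvCumSum costs.reverse 0
  let tcount : Nat := suffix.countP (fun p => decide (p ≤ half))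
  let n : Int := PySem.List.len lines
  let head := (PySem.List.enumerate (PySem.List.slice lines none (some (h : Int))) 0).map
      (fun p => pvFmt p.1 p.2)
  let tail := (PySem.List.enumerate (PySem.List.slice lines (some (n - tcount)) none) (n - tcount)).map
      (fun p => pvFmt p.1 p.2)
  let head_end : Int := (h : Int)
  let tail_start : Int := n - tcount + 1
  let skipped := tail_start - head_end - 1
  let result := PySem.Str.join "\n" head
  if skipped > 0 then
    result ++ ("\n    | // ... (Line " ++ PySem.Int.toStr (head_end + 1) ++ "~" ++
      PySem.Int.toStr (tail_start - 1) ++ ", " ++ PySem.Int.toStr skipped ++ "줄 생략)\n") ++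
      PySem.Str.join "\n" tail
  else result

-- ===== PRECONDITION & SPEC =====
def Spec_fallback_chunk_py (lines : List String) (max_chars : Int) (out : String) : Prop := out = fallback_chunk_py_alt lines max_chars
instance (lines : List String) (max_chars : Int) (out : String) : Decidable (Spec_fallback_chunk_py lines max_chars out) := by unfold Spec_fallback_chunk_py; infer_instance

-- ===== CLAIM (what is proved, stated in full; the proofs are below) =====
def Claim_equal_fallback_chunk_py : Prop := ∀ (lines : List String) (max_chars : Int), Dom_fallback_chunk_py lines max_chars → Spec_fallback_chunk_py lines max_chars (fallback_chunk_py lines max_chars)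

-- ===== LEMMAS AND PROOFS =====

theorem pvCost_nonneg (l : String) : 0 ≤ pvCost l := by
  simp [pvCost, PySem.Str.len_eq]; positivity

theorem pvCumSum_ge (cs : List Int) (t : Int) (h : ∀ c ∈ cs, 0 ≤ c) :
    ∀ p ∈ pvCumSum cs t, t ≤ p := by
  induction cs generalizing t with
  | nil => simp [pvCumSum]
  | cons c cs ih =>
    intro p hp
    simp only [pvCumSum, List.mem_cons] at hp
    have hc : 0 ≤ c := h c (by simp)
    rcases hp with rfl | hp
    · omega
    · have := ih (t + c) (fun c' hc' => h c' (by simp [hc'])) p hp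
      omega

theorem pvCumSum_length (cs : List Int) (t : Int) : (pvCumSum cs t).length = cs.length := by
  induction cs generalizing t with
  | nil => rfl
  | cons c cs ih => simp [pvCumSum, ih]

theorem pvCumSum_countP_zero (cs : List Int) (t half : Int) (h : ∀ c ∈ cs, 0 ≤ c)
    (ht : half < t) : (pvCumSum cs t).countP (fun p => decide (p ≤ half)) = 0 := by
  rw [List.countP_eq_zero]
  intro p hp
  have := pvCumSum_ge cs t h p hp
  simp; omega

theorem pvHead_eq (half : Int) (ls : List String) (i tot : Int) :
    pvHeadLoopA half ls i tot =
      (PySem.List.enumerate (ls.take ((pvCumSum (ls.map pvCost) tot).countP (fun p => decide (p ≤ half)))) i).map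
        (fun p => pvFmt p.1 p.2) := by
  induction ls generalizing i tot with
  | nil => simp [pvHeadLoopA, PySem.List.enumerate_nil]
  | cons l ls ih =>
    simp only [pvHeadLoopA, List.map_cons, pvCumSum]
    by_cases hgt : tot + pvCost l > half
    · rw [if_pos hgt]
      have h0 : ((tot + pvCost l) :: pvCumSum (ls.map pvCost) (tot + pvCost l)).countP (fun p => decide (p ≤ half)) = 0 := by
        rw [List.countP_cons]
        rw [pvCumSum_countP_zero _ _ _ (by intro c hc; obtain ⟨l', _, rfl⟩ := List.mem_map.mp hc; exact pvCost_nonneg l') (by omega)]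
        simp; omega
      rw [h0]
      simp [PySem.List.enumerate_nil]
    · rw [if_neg hgt]
      rw [List.countP_cons]
      have hd : (decide ((tot + pvCost l) ≤ half)) = true := by simp; omega
      rw [hd]
      simp only [if_true]
      rw [List.take_succ_cons, PySem.List.enumerate_cons, List.map_cons, ih]

theorem pvTail_eq (half : Int) (lines : List String) (m : Nat) (hm : m ≤ lines.length) :
    ∀ (acc : List String) (tot : Int),
    pvTailLoopA half lines (PySem.List.pyRange ((m : Int) - 1) (-1) (-1)) acc tot =
      (PySem.List.enumerate ((lines.take m).drop
          (m - (pvCumSum ((lines.take m).map pvCost).reverse tot).countP (fun p => decide (p ≤ half))))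
        ((m : Int) - (pvCumSum ((lines.take m).map pvCost).reverse tot).countP (fun p => decide (p ≤ half)))).map
        (fun p => pvFmt p.1 p.2) ++ acc := by
  induction m with
  | zero =>
    intro acc tot
    rw [show ((0 : Nat) : Int) - 1 = -1 by ring, PySem.List.pyRange_neg_one_eq_nil (by omega)]
    simp [pvTailLoopA, pvCumSum, PySem.List.enumerate_nil]
  | succ m ih =>
    intro acc tot
    have hm' : m ≤ lines.length := by omega
    have hmlt : m < lines.length := by omega
    rw [show ((m + 1 : Nat) : Int) - 1 = (m : Int) by push_cast; ring]
    rw [PySem.List.pyRange_neg_one_cons (by omega)]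
    have hget : PySem.List.pyGetD lines ((m : Nat) : Int) "" = lines[m] := by
      simp [PySem.List.pyGetD_eq_getElem, hmlt]
    have htake : lines.take (m + 1) = lines.take m ++ [lines[m]] := by
      rw [List.take_add_one, List.getElem?_eq_getElem hmlt]; rfl
    have hcum : pvCumSum ((lines.take (m + 1)).map pvCost).reverse tot =
        (tot + pvCost lines[m]) ::
          pvCumSum ((lines.take m).map pvCost).reverse (tot + pvCost lines[m]) := by
      rw [htake, List.map_append, List.reverse_append]
      simp only [List.map_cons, List.map_nil, List.reverse_cons, List.reverse_nil,
        List.nil_append, List.singleton_append, pvCumSum]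
    simp only [pvTailLoopA, hget, hcum]
    set c := pvCost lines[m] with hc
    by_cases hgt : tot + c > half
    · rw [if_pos hgt]
      have h0 : ((tot + c) :: pvCumSum ((lines.take m).map pvCost).reverse (tot + c)).countP
          (fun p => decide (p ≤ half)) = 0 := by
        rw [List.countP_cons,
          pvCumSum_countP_zero _ _ _ (by
            intro x hx
            obtain ⟨l', _, rfl⟩ := List.mem_map.mp (List.mem_reverse.mp hx)
            exact pvCost_nonneg l') (by omega)]
        simp; omega
      rw [h0]
      have hlen : (lines.take (m + 1)).length = m + 1 := by
        rw [List.length_take]; omega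
      rw [show (m + 1 - 0 : Nat) = m + 1 from rfl, List.drop_eq_nil_of_le (by omega)]
      simp [PySem.List.enumerate_nil]
    · rw [if_neg hgt]
      rw [ih hm' (pvFmt (m : Int) lines[m] :: acc) (tot + c)]
      set t' := (pvCumSum ((lines.take m).map pvCost).reverse (tot + c)).countP
        (fun p => decide (p ≤ half)) with ht'
      have ht'le : t' ≤ m := by
        have := List.countP_le_length (l := pvCumSum ((lines.take m).map pvCost).reverse (tot + c))
          (p := fun p => decide (p ≤ half))
        rw [pvCumSum_length] at this
        simp only [List.length_reverse, List.length_map, List.length_take] at this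
        omega
      have hcount : ((tot + c) :: pvCumSum ((lines.take m).map pvCost).reverse (tot + c)).countP
          (fun p => decide (p ≤ half)) = t' + 1 := by
        rw [List.countP_cons]
        have : decide (tot + c ≤ half) = true := by simp; omega
        rw [this]; simp only [if_true]
        rw [← ht']
      rw [hcount]
      have hnat : m + 1 - (t' + 1) = m - t' := by omega
      rw [hnat]
      have hdrop : (lines.take (m + 1)).drop (m - t') =
          (lines.take m).drop (m - t') ++ [lines[m]] := by
        rw [htake, List.drop_append_of_le_length]
        rw [List.length_take]; omega
      rw [hdrop]
      have hlen2 : ((lines.take m).drop (m - t')).length = t' := by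
        rw [List.length_drop, List.length_take]; omega
      rw [PySem.List.enumerate_append, hlen2]
      have hint : ((m + 1 : Nat) : Int) - ((t' + 1 : Nat) : Int) = (m : Int) - (t' : Int) := by
        push_cast; ring
      rw [hint]
      have hstart : (m : Int) - (t' : Int) + (t' : Int) = (m : Int) := by ring
      rw [hstart]
      simp [PySem.List.enumerate_cons, PySem.List.enumerate_nil]

theorem main_eq (lines : List String) (max_chars : Int) :
    fallback_chunk_py lines max_chars = fallback_chunk_py_alt lines max_chars := by
  unfold fallback_chunk_py fallback_chunk_py_alt
  simp only [PySem.List.len_eq]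
  set half := PySem.Int.floordiv max_chars 2 with hhalf
  set n := lines.length with hn
  set h := (pvCumSum (lines.map pvCost) 0).countP (fun p => decide (p ≤ half)) with hh
  set t := (pvCumSum (lines.map pvCost).reverse 0).countP (fun p => decide (p ≤ half)) with ht
  have hhn : h ≤ n := by
    have := List.countP_le_length (l := pvCumSum (lines.map pvCost) 0)
      (p := fun p => decide (p ≤ half))
    rw [pvCumSum_length] at this
    simpa using this
  have htn : t ≤ n := by
    have := List.countP_le_length (l := pvCumSum (lines.map pvCost).reverse 0)
      (p := fun p => decide (p ≤ half))
    rw [pvCumSum_length] at this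
    simpa using this
  have hhead : pvHeadLoopA half lines 0 0 =
      (PySem.List.enumerate (PySem.List.slice lines none (some (h : Int))) 0).map
        (fun p => pvFmt p.1 p.2) := by
    rw [PySem.List.slice_to_natCast, pvHead_eq]
  have htail : pvTailLoopA half lines (PySem.List.pyRange ((n : Int) - 1) (-1) (-1)) [] 0 =
      (PySem.List.enumerate (PySem.List.slice lines (some ((n : Int) - t)) none) ((n : Int) - t)).map
        (fun p => pvFmt p.1 p.2) := by
    have hcast : ((n : Int) - (t : Int)) = ((n - t : Nat) : Int) := by omega
    rw [hcast, PySem.List.slice_from_natCast]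
    have := pvTail_eq half lines n (by omega) [] 0
    rw [List.take_length, ← ht] at this
    rw [this, List.append_nil, hcast]
  have hlenhead : ((PySem.List.enumerate (PySem.List.slice lines none (some (h : Int))) 0).map
      (fun p => pvFmt p.1 p.2)).length = h := by
    rw [List.length_map, PySem.List.length_enumerate, PySem.List.slice_to_natCast,
      List.length_take]
    omega
  have hlentail : ((PySem.List.enumerate (PySem.List.slice lines (some ((n : Int) - t)) none) ((n : Int) - t)).map
      (fun p => pvFmt p.1 p.2)).length = t := by
    have hcast : ((n : Int) - (t : Int)) = ((n - t : Nat) : Int) := by omega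
    rw [List.length_map, PySem.List.length_enumerate, hcast, PySem.List.slice_from_natCast,
      List.length_drop]
    omega
  rw [hhead, htail, hlenhead, hlentail]

-- ===== VERDICT (by name: the statement is the Claim_ definition above) =====
theorem fallback_chunk_py_spec : Claim_equal_fallback_chunk_py := by
  intro lines max_chars _
  exact main_eq lines max_chars
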